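-- pv_equiv track=rewrite | github.com/Tanushree713/BasicsInPython | testing.py | balanceStr
-- ===== SOURCE A (Python) =====
-- def balanceStr(string):
--     count = 0
--     r = 0
--     for i in range(len(string)):
--         if string[i] == "R":
--             r += 1
--         elif string[i] == "L":
--             r -= 1
--         if r == 0 :
--             count += 1
--     return count
-- ===== SOURCE B (Python) =====
-- def balanceStr(string):
--     # Stateless per-prefix recount: a prefix is balanced iff it has as many
--     # "R"s as "L"s, so count, for each prefix independently, its R's and L's
--     # with str.count and tally the prefixes where the two counts agree.
--     return sum(string[:i + 1].count("R") == string[:i + 1].count("L")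
--                for i in range(len(string)))
-- ===== Notes on version B (the rewrite author's own statement) =====
-- stated objective: alternative
-- what changed: Replaced the single running-balance accumulator loop with a stateless per-prefix recount: for each prefix, independently count its R's and L's with str.count and tally the prefixes where the counts are equal (no running state carried between steps).
import Mathlib
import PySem

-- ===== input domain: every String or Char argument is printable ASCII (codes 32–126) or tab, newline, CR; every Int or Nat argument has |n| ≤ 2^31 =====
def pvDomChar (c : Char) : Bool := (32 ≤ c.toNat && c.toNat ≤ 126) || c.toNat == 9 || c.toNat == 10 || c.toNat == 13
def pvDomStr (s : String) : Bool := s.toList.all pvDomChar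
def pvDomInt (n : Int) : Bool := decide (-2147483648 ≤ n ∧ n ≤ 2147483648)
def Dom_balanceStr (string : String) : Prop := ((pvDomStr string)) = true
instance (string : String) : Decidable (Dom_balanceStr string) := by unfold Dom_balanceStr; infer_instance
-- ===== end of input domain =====

-- B replaces A's running-balance accumulator loop with a stateless per-prefix recount
-- (each prefix's R's and L's are counted independently); equal return value proved.

-- ===== PORT A =====
-- A: one loop over the characters, carrying the balance r and the counter together.
def balanceStr (string : String) : Int :=
  (string.toList.foldl
    (fun (st : Int × Int) c =>
      let r := if c == 'R' then st.2 + 1 else if c == 'L' then st.2 - 1 else st.2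
      (if r == 0 then st.1 + 1 else st.1, r))
    (0, 0)).1

-- ===== PORT B =====
-- B: for each i in range(len(string)), recount R's and L's of the prefix string[:i+1]
-- independently and tally the prefixes where the two counts agree (sum of booleans = countP).
def balanceStr_alt (string : String) : Int :=
  ((List.range string.toList.length).countP
    (fun i => (string.toList.take (i + 1)).count 'R' == (string.toList.take (i + 1)).count 'L') : Int)

-- ===== PRECONDITION & SPEC =====
def Spec_balanceStr (string : String) (out : Int) : Prop := out = balanceStr_alt string
instance (string : String) (out : Int) : Decidable (Spec_balanceStr string out) := by unfold Spec_balanceStr; infer_instance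

-- ===== CLAIM (what is proved, stated in full; the proofs are below) =====
def Claim_equal_balanceStr : Prop := ∀ (string : String), Dom_balanceStr string → Spec_balanceStr string (balanceStr string)

-- ===== LEMMAS AND PROOFS =====
-- balance of a prefix, as an Int
def pvBal (p : List Char) : Int := (p.count 'R' : Int) - (p.count 'L' : Int)

theorem pvBal_cons (c : Char) (p : List Char) :
    pvBal (c :: p) = (if c == 'R' then (1:Int) else if c == 'L' then -1 else 0) + pvBal p := by
  unfold pvBal
  by_cases h1 : c = 'R' <;> by_cases h2 : c = 'L' <;>
    simp_all <;> ring

-- A's loop from (count, r) returns count plus the number of nonempty prefixes whose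
-- balance cancels r.
theorem pv_loop_eq_count (cs : List Char) : ∀ (count r : Int),
    (cs.foldl
      (fun (st : Int × Int) c =>
        let r := if c == 'R' then st.2 + 1 else if c == 'L' then st.2 - 1 else st.2
        (if r == 0 then st.1 + 1 else st.1, r))
      (count, r)).1
    = count + ((List.range cs.length).countP
        (fun i => r + pvBal (cs.take (i + 1)) == 0) : Int) := by
  induction cs with
  | nil => intro count r; simp
  | cons c cs ih =>
    intro count r
    have hr : (if c == 'R' then r + 1 else if c == 'L' then r - 1 else r)
        = r + (if c == 'R' then (1:Int) else if c == 'L' then -1 else 0) := by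
      split_ifs <;> ring
    simp only [List.foldl_cons, hr]
    rw [ih]
    have hrange : List.range (c :: cs).length = 0 :: (List.range cs.length).map Nat.succ := by
      simp [List.length_cons, List.range_succ_eq_map]
    rw [hrange, List.countP_cons, List.countP_map]
    have hcond : ((fun i => r + pvBal ((c :: cs).take (i + 1)) == 0) ∘ Nat.succ)
        = (fun i => r + (if c == 'R' then (1:Int) else if c == 'L' then -1 else 0)
            + pvBal (cs.take (i + 1)) == 0) := by
      funext i
      simp only [Function.comp, List.take_succ_cons, pvBal_cons]
      congr 1
      ring
    rw [hcond]
    have h0 : (r + pvBal ((c :: cs).take (0 + 1)) == 0)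
        = (r + (if c == 'R' then (1:Int) else if c == 'L' then -1 else 0) == 0) := by
      by_cases h1 : c = 'R' <;> by_cases h2 : c = 'L' <;> simp_all [pvBal]
    rw [h0]
    split_ifs with h <;> simp_all <;> ring

-- ===== VERDICT (by name: the statement is the Claim_ definition above) =====
theorem balanceStr_spec : Claim_equal_balanceStr := by
  intro s _
  unfold Spec_balanceStr balanceStr balanceStr_alt
  rw [pv_loop_eq_count s.toList 0 0, zero_add]
  congr 1
  apply List.countP_congr
  intro i _
  simp only [zero_add, pvBal]
  by_cases h : ((s.toList.take (i+1)).count 'R' : Int) = (s.toList.take (i+1)).count 'L' <;>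
    simp_all <;> omega
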